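-- pv_equiv track=rewrite | github.com/saehoon0501/- | brute_force/모의고사(프로그래머스).py | solution
-- ===== SOURCE A (Python) =====
-- def solution(answers):
--     first = [1, 2, 3, 4, 5]
--     second = [2, 1, 2, 3, 2, 4, 2, 5]
--     third = [3, 3, 1, 1, 2, 2, 4, 4, 5, 5]
--     result = []
--
--     firstCount = 0
--     secondCount = 0
--     thirdCount = 0
--
--     for i in range(len(answers)):
--         answer = answers[i]
--         if answer == first[i % len(first)]:
--             firstCount += 1
--         if answer == second[i % len(second)]:
--             secondCount += 1
--         if answer == third[i % len(third)]:
--             thirdCount += 1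
--
--     maximum = max(firstCount, secondCount, thirdCount)
--     if firstCount == maximum:
--         result.append(1)
--     if secondCount == maximum:
--         result.append(2)
--     if thirdCount == maximum:
--         result.append(3)
--
--     return result
-- ===== SOURCE B (Python) =====
-- def solution(answers):
--     patterns = ([1, 2, 3, 4, 5], [2, 1, 2, 3, 2, 4, 2, 5], [3, 3, 1, 1, 2, 2, 4, 4, 5, 5])
--     scores = []
--     for pat in patterns:
--         rot = list(pat)
--         s = 0
--         for a in answers:
--             if a == rot[0]:
--                 s += 1
--             rot = rot[1:] + rot[:1]
--         scores.append(s)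
--     best = max(scores)
--     return [k for k in (1, 2, 3) if scores[k - 1] == best]
-- ===== Notes on version B (the rewrite author's own statement) =====
-- stated objective: alternative
-- what changed: Replaced index arithmetic entirely: instead of one fused indexed loop with i % len lookups into three fixed patterns, B scores each pattern by maintaining a rotating copy of the pattern (compare the answer to the rotation's head, then rotate one step), so no indices or modulo are used; ties are then collected from the scores list.
import Mathlib
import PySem

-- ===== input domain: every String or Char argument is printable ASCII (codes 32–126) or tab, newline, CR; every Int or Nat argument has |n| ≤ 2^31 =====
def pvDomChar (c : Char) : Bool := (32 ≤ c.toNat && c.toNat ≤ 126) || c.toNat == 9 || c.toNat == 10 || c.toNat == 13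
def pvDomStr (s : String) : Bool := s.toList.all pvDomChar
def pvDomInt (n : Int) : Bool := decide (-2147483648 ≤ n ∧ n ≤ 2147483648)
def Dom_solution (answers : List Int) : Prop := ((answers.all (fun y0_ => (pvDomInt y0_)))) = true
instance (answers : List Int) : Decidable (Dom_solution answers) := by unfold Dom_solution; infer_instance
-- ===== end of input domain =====

-- B scores each pattern by stepwise ROTATION of the pattern (compare the answer to the
-- rotation's head, then rotate the pattern one step) instead of A's fused indexed loop
-- with i % len lookups; no indices or modulo are used (alternative; same O(n) cost).

-- ===== PORT A =====
-- A's loop body: the three conditional counter updates of one iteration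
def solutionLoop (answers : List Int) (st : Int × Int × Int) (i : Int) : Int × Int × Int :=
  let first : List Int := [1, 2, 3, 4, 5]
  let second : List Int := [2, 1, 2, 3, 2, 4, 2, 5]
  let third : List Int := [3, 3, 1, 1, 2, 2, 4, 4, 5, 5]
  let answer := PySem.List.pyGetD answers i 0   -- answers[i]; i ∈ range(len(answers)) is always in range
  let f := if answer = PySem.List.pyGetD first (PySem.Int.mod i (first.length : Int)) 0 then st.1 + 1 else st.1
  let s := if answer = PySem.List.pyGetD second (PySem.Int.mod i (second.length : Int)) 0 then st.2.1 + 1 else st.2.1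
  let t := if answer = PySem.List.pyGetD third (PySem.Int.mod i (third.length : Int)) 0 then st.2.2 + 1 else st.2.2
  (f, s, t)

def solution (answers : List Int) : List Int :=
  let counts := (PySem.List.pyRange 0 (answers.length : Int) 1).foldl (solutionLoop answers) (0, 0, 0)
  let maximum := max counts.1 (max counts.2.1 counts.2.2)   -- max(a, b, c)
  (if counts.1 = maximum then [1] else []) ++
    (if counts.2.1 = maximum then [2] else []) ++
      (if counts.2.2 = maximum then [3] else [])

-- ===== PORT B =====
-- inner loop of B: state (s, rot); 'if a == rot[0]: s += 1' then 'rot = rot[1:] + rot[:1]'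
def rotStep (st : Int × List Int) (a : Int) : Int × List Int :=
  ((if a = PySem.List.pyGetD st.2 0 0 then st.1 + 1 else st.1),
   PySem.List.slice st.2 (some 1) none ++ PySem.List.slice st.2 none (some 1))

-- one iteration of B's outer loop over patterns
def patScore (pat : List Int) (answers : List Int) : Int :=
  (answers.foldl rotStep (0, pat)).1

def solution_alt (answers : List Int) : List Int :=
  let patterns : List (List Int) :=
    [[1, 2, 3, 4, 5], [2, 1, 2, 3, 2, 4, 2, 5], [3, 3, 1, 1, 2, 2, 4, 4, 5, 5]]
  let scores := patterns.map (fun pat => patScore pat answers)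
  let best := (PySem.List.max? scores (fun x => x)).getD 0   -- max(scores); scores always has 3 elements
  ([1, 2, 3] : List Int).filter (fun k => PySem.List.pyGetD scores (k - 1) 0 == best)

-- ===== PRECONDITION & SPEC =====
def Spec_solution (answers : List Int) (out : List Int) : Prop := out = solution_alt answers
instance (answers : List Int) (out : List Int) : Decidable (Spec_solution answers out) := by unfold Spec_solution; infer_instance

-- ===== CLAIM (what is proved, stated in full; the proofs are below) =====
def Claim_equal_solution : Prop := ∀ (answers : List Int), Dom_solution answers → Spec_solution answers (solution answers)

-- ===== LEMMAS AND PROOFS =====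

-- match count of pattern `pat` against `answers`, starting at position k — the common value
def cnt (pat : List Int) : Nat → List Int → Int
  | _, [] => 0
  | k, a :: rest =>
      (if a = PySem.List.pyGetD pat (PySem.Int.mod (k : Int) (pat.length : Int)) 0 then 1 else 0) +
        cnt pat (k + 1) rest

theorem cnt_append (pat xs : List Int) (x : Int) (k : Nat) :
    cnt pat k (xs ++ [x]) =
      cnt pat k xs +
        (if x = PySem.List.pyGetD pat (PySem.Int.mod ((k + xs.length : Nat) : Int) (pat.length : Int)) 0
          then 1 else 0) := by
  induction xs generalizing k with
  | nil => simp [cnt]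
  | cons y ys ih =>
      simp only [List.cons_append, cnt, ih (k + 1)]
      have : (k + 1) + ys.length = k + (y :: ys).length := by simp; omega
      rw [this]
      ring

theorem loop_eq (answers : List Int) :
    (PySem.List.pyRange 0 (answers.length : Int) 1).foldl (solutionLoop answers) (0, 0, 0) =
      (cnt [1, 2, 3, 4, 5] 0 answers,
       cnt [2, 1, 2, 3, 2, 4, 2, 5] 0 answers,
       cnt [3, 3, 1, 1, 2, 2, 4, 4, 5, 5] 0 answers) := by
  induction answers using List.reverseRecOn with
  | nil => simp [PySem.List.pyRange_one_eq_nil, cnt]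
  | append_singleton xs x ih =>
    have hlen : ((xs ++ [x]).length : Int) = (xs.length : Int) + 1 := by simp
    rw [hlen, PySem.List.pyRange_one_succ_right (by positivity), List.foldl_append]
    have hcongr :
        (PySem.List.pyRange 0 (xs.length : Int) 1).foldl (solutionLoop (xs ++ [x])) ((0 : Int), (0 : Int), (0 : Int)) =
          (PySem.List.pyRange 0 (xs.length : Int) 1).foldl (solutionLoop xs) ((0 : Int), (0 : Int), (0 : Int)) := by
      apply PySem.List.foldl_congr_mem
      intro st i hi
      have hmem := (PySem.List.mem_pyRange_one).1 hi
      simp only [solutionLoop]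
      rw [PySem.List.pyGetD_eq_getElem _ _ hmem.1 (by simp; omega),
          PySem.List.pyGetD_eq_getElem _ _ hmem.1 (by exact_mod_cast hmem.2),
          List.getElem_append_left (by omega)]
    rw [hcongr, ih]
    have hx : PySem.List.pyGetD (xs ++ [x]) (xs.length : Int) 0 = x := by
      rw [PySem.List.pyGetD_eq_getElem _ _ (Int.natCast_nonneg _) (by simp)]
      simp
    simp only [solutionLoop, List.foldl_cons, List.foldl_nil, hx]
    rw [cnt_append, cnt_append, cnt_append]
    simp only [Nat.zero_add]
    split_ifs <;> simp_all

-- B's rotating fold, started at rotation k, computes cnt from position k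
theorem rot_fold (pat : List Int) (hp : pat ≠ []) (answers : List Int) :
    ∀ (k : Nat) (s : Int),
      (answers.foldl rotStep (s, pat.rotate k)).1 = s + cnt pat k answers := by
  induction answers with
  | nil => intro k s; simp [cnt]
  | cons a rest ih =>
      intro k s
      have hlen : 0 < pat.length := List.length_pos_iff.2 hp
      have hrlen : (pat.rotate k).length = pat.length := List.length_rotate pat k
      have hmod : PySem.Int.mod (k : Int) (pat.length : Int) = ((k % pat.length : Nat) : Int) :=
        PySem.Int.mod_natCast k pat.length
      have hhead : PySem.List.pyGetD (pat.rotate k) 0 0 =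
          PySem.List.pyGetD pat (PySem.Int.mod (k : Int) (pat.length : Int)) 0 := by
        rw [hmod,
            PySem.List.pyGetD_eq_getElem (pat.rotate k) 0 le_rfl (by rw [hrlen]; exact_mod_cast hlen),
            PySem.List.pyGetD_eq_getElem pat _ (by positivity) (by exact_mod_cast Nat.mod_lt k hlen)]
        rw [List.getElem_rotate]
        congr 1
        simp
        omega
      have hrot : PySem.List.slice (pat.rotate k) (some 1) none ++
            PySem.List.slice (pat.rotate k) none (some 1) = pat.rotate (k + 1) := by
        have hs : PySem.List.slice (pat.rotate k) (some 1) none ++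
              PySem.List.slice (pat.rotate k) none (some 1) =
            (pat.rotate k).drop 1 ++ (pat.rotate k).take 1 := by
          simp [PySem.List.slice_from, PySem.List.slice_to]
        rw [hs, ← List.rotate_eq_drop_append_take (by omega), List.rotate_rotate]
      simp only [List.foldl_cons, rotStep, hhead, hrot, cnt]
      rw [ih (k + 1)]
      split_ifs <;> ring

theorem patScore_eq (pat : List Int) (hp : pat ≠ []) (answers : List Int) :
    patScore pat answers = cnt pat 0 answers := by
  have := rot_fold pat hp answers 0 0
  simpa [patScore, List.rotate_zero] using this

-- the tail of both programs, as a function of the three scores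
theorem tail_eq (s1 s2 s3 : Int) :
    (if s1 = max s1 (max s2 s3) then [1] else []) ++
        (if s2 = max s1 (max s2 s3) then [2] else []) ++
          (if s3 = max s1 (max s2 s3) then [3] else []) =
      ([1, 2, 3] : List Int).filter
        (fun k => PySem.List.pyGetD [s1, s2, s3] (k - 1) 0 ==
          (PySem.List.max? [s1, s2, s3] (fun x => x)).getD 0) := by
  rw [PySem.List.max?_id_cons]
  simp only [List.foldl_cons, List.foldl_nil, Option.getD_some, List.filter_cons,
    List.filter_nil, beq_iff_eq]
  have e1 : PySem.List.pyGetD [s1, s2, s3] (1 - 1) 0 = s1 := rfl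
  have e2 : PySem.List.pyGetD [s1, s2, s3] (2 - 1) 0 = s2 := rfl
  have e3 : PySem.List.pyGetD [s1, s2, s3] (3 - 1) 0 = s3 := rfl
  rw [e1, e2, e3, max_assoc]
  split_ifs <;> rfl

-- ===== VERDICT (by name: the statement is the Claim_ definition above) =====
theorem solution_spec : Claim_equal_solution := by
  intro answers _
  show solution answers = solution_alt answers
  simp only [solution, solution_alt, List.map_cons, List.map_nil, loop_eq]
  rw [patScore_eq [1, 2, 3, 4, 5] (by simp) answers,
      patScore_eq [2, 1, 2, 3, 2, 4, 2, 5] (by simp) answers,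
      patScore_eq [3, 3, 1, 1, 2, 2, 4, 4, 5, 5] (by simp) answers]
  exact tail_eq _ _ _
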